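-- pv_equiv track=rewrite | github.com/jnsp/learn-to-code-by-solving-problems | ch08/bard.py | villagers_with_all_songs
-- ===== SOURCE A (Python) =====
-- from collections import defaultdict
--
-- def villagers_with_all_songs(evenings: list[list[int]]) -> list[int]:
--     villagers_songs = defaultdict(set)
--     bard = 1
--
--     for i, villagers in enumerate(evenings):
--         if bard in villagers:
--             for villager in villagers:
--                 villagers_songs[villager].add(f"song#{i}")
--         else:
--             exchanged_songs = set()
--             for villager in villagers:
--                 exchanged_songs |= villagers_songs[villager]
--             for villager in villagers:
--                 villagers_songs[villager] |= exchanged_songs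
--
--     all_songs = villagers_songs[bard]
--     result = [villager for villager, songs in villagers_songs.items() if songs == all_songs]
--
--     return sorted(result)
-- ===== SOURCE B (Python) =====
-- def villagers_with_all_songs(evenings: list[list[int]]) -> list[int]:
--     bard = 1
--     knowers = {}          # bard-evening index -> set of villagers who know that song
--     seen = set()
--     for i, vs in enumerate(evenings):
--         seen.update(vs)
--         if bard in vs:
--             knowers[i] = set(vs)
--         else:
--             present = set(vs)
--             for ks in knowers.values():
--                 if ks & present:
--                     ks |= present
--     seen.add(bard)
--     return sorted(v for v in seen if all(v in ks for ks in knowers.values()))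
-- ===== Notes on version B (the rewrite author's own statement) =====
-- stated objective: alternative
-- what changed: B transposes the state: instead of A's per-villager sets of song strings that are unioned pairwise on every exchange evening, B keeps one knower-set of villagers per bard-created song (plus a set of villagers ever seen) and forward-propagates each song to the present villagers; a villager qualifies iff they are in every song's knower set.
import Mathlib
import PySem

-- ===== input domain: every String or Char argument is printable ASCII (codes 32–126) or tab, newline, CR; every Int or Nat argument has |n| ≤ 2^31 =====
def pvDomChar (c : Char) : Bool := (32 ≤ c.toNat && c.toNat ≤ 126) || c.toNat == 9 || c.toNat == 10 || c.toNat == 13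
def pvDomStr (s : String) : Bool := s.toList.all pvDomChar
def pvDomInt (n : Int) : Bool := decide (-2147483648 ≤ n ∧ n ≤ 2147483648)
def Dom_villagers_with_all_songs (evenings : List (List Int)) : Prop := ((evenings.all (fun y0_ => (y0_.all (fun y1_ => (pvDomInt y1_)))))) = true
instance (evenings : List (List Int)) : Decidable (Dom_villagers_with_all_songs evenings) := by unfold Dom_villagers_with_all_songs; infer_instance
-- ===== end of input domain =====

-- B replaces A's per-villager song-set propagation by the transposed per-song knower-set
-- propagation (alternative decomposition, same observable result; similar cost).

-- ===== PORT A =====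
-- f"song#{i}"
def pvSong (i : Int) : String := "song#" ++ PySem.Int.toStr i

-- 'for villager in villagers: villagers_songs[villager].add(song)'  (defaultdict: missing key appends with the new set)
def pvAddSongs (song : String) (villagers : List Int) (d : PySem.Dict Int (PySem.Set String)) :
    PySem.Dict Int (PySem.Set String) :=
  villagers.foldl (fun d v => d.insert v (PySem.Set.add (d.getD v PySem.Set.empty) song)) d

-- 'exchanged_songs = set(); for villager in villagers: exchanged_songs |= villagers_songs[villager]'
-- (the defaultdict READ creates a missing key with an empty set: setdefault)
def pvExchange1 (villagers : List Int) (d : PySem.Dict Int (PySem.Set String)) :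
    PySem.Dict Int (PySem.Set String) × PySem.Set String :=
  villagers.foldl (fun st v =>
    (st.1.setdefault v PySem.Set.empty,
     PySem.Set.union st.2 (st.1.getD v PySem.Set.empty)))
    (d, PySem.Set.empty)

-- 'for villager in villagers: villagers_songs[villager] |= exchanged_songs'
def pvExchange2 (ex : PySem.Set String) (villagers : List Int) (d : PySem.Dict Int (PySem.Set String)) :
    PySem.Dict Int (PySem.Set String) :=
  villagers.foldl (fun d v => d.insert v (PySem.Set.union (d.getD v PySem.Set.empty) ex)) d

-- the body of A's 'for i, villagers in enumerate(evenings)' loop (bard = 1)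
def pvStepA (d : PySem.Dict Int (PySem.Set String)) (p : Int × List Int) :
    PySem.Dict Int (PySem.Set String) :=
  if p.2.contains 1 then
    pvAddSongs (pvSong p.1) p.2 d
  else
    let st := pvExchange1 p.2 d
    pvExchange2 st.2 p.2 st.1

def villagers_with_all_songs (evenings : List (List Int)) : List Int :=
  let d := (PySem.List.enumerate evenings 0).foldl pvStepA PySem.Dict.empty
  -- 'all_songs = villagers_songs[bard]'  (defaultdict read: creates the key if missing)
  let d := d.setdefault 1 PySem.Set.empty
  let allSongs := d.getD 1 PySem.Set.empty
  -- '[villager for villager, songs in villagers_songs.items() if songs == all_songs]', then sorted(...)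
  PySem.List.sorted ((d.items.filter (fun q => PySem.Set.equal q.2 allSongs)).map (·.1)) (fun x => x) false

-- ===== PORT B =====
-- 'for ks in knowers.values(): if ks & present: ks |= present'
def pvSpread (present : PySem.Set Int) (kn : PySem.Dict Int (PySem.Set Int)) :
    PySem.Dict Int (PySem.Set Int) :=
  kn.items.foldl (fun kn q =>
    if PySem.Set.inter q.2 present ≠ [] then kn.insert q.1 (PySem.Set.union q.2 present) else kn) kn

-- the body of B's loop: state = (knowers, seen)
def pvStepB (st : PySem.Dict Int (PySem.Set Int) × PySem.Set Int) (p : Int × List Int) :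
    PySem.Dict Int (PySem.Set Int) × PySem.Set Int :=
  let seen := PySem.Set.update st.2 p.2
  if p.2.contains 1 then
    (st.1.insert p.1 (PySem.Set.ofList p.2), seen)
  else
    (pvSpread (PySem.Set.ofList p.2) st.1, seen)

def villagers_with_all_songs_alt (evenings : List (List Int)) : List Int :=
  let st := (PySem.List.enumerate evenings 0).foldl pvStepB (PySem.Dict.empty, PySem.Set.empty)
  let seen := PySem.Set.add st.2 1
  PySem.List.sorted
    (seen.filter (fun v => st.1.values.all (fun ks => PySem.Set.contains ks v)))
    (fun x => x) false

-- ===== PRECONDITION & SPEC =====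
def Spec_villagers_with_all_songs (evenings : List (List Int)) (out : List Int) : Prop := out = villagers_with_all_songs_alt evenings
instance (evenings : List (List Int)) (out : List Int) : Decidable (Spec_villagers_with_all_songs evenings out) := by unfold Spec_villagers_with_all_songs; infer_instance

-- ===== CLAIM (what is proved, stated in full; the proofs are below) =====
def Claim_equal_villagers_with_all_songs : Prop := ∀ (evenings : List (List Int)), Dom_villagers_with_all_songs evenings → Spec_villagers_with_all_songs evenings (villagers_with_all_songs evenings)

-- ===== LEMMAS AND PROOFS =====

-- the invariant tying A's per-villager dict to B's per-song dict + seen set after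
-- processing a prefix of the evenings (s = the next enumerate index)
def pvInv (dA : PySem.Dict Int (PySem.Set String)) (kn : PySem.Dict Int (PySem.Set Int))
    (seen : PySem.Set Int) (s : Int) : Prop :=
  dA.keys.Nodup ∧ kn.keys.Nodup ∧ seen.Nodup ∧
  (∀ v : Int, v ∈ dA.keys ↔ v ∈ seen) ∧
  (∀ i ∈ kn.keys, 0 ≤ i ∧ i < s) ∧
  (∀ i S, kn.get? i = some S → (1 : Int) ∈ S) ∧
  (∀ i S, kn.get? i = some S → ∀ v : Int, v ∈ S ↔ pvSong i ∈ dA.getD v PySem.Set.empty) ∧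
  (∀ (v : Int) (str : String), str ∈ dA.getD v PySem.Set.empty → ∃ i ∈ kn.keys, str = pvSong i)

-- injectivity of the song label on nonnegative indices
lemma pvDigitChar_inj (a b : Nat) (ha : a < 10) (hb : b < 10)
    (h : Nat.digitChar a = Nat.digitChar b) : a = b := by
  interval_cases a <;> interval_cases b <;> simp_all [Nat.digitChar]

lemma pvToDigitsCore_eq (f : Nat) : ∀ (n : Nat) (l : List Char), 0 < n → n < f →
    Nat.toDigitsCore 10 f n l = ((Nat.digits 10 n).map Nat.digitChar).reverse ++ l := by
  induction f with
  | zero => intro n l h1 hf; omega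
  | succ f ih =>
    intro n l h1 hf
    rw [Nat.digits_def' (by norm_num : (1:Nat) < 10) h1]
    simp only [Nat.toDigitsCore]
    by_cases h : n / 10 = 0
    · simp [h]
    · rw [if_neg h, ih (n / 10) _ (Nat.pos_of_ne_zero h) (by omega)]
      simp

lemma pvToDigits10_eq (n : Nat) (h : 0 < n) :
    Nat.toDigits 10 n = ((Nat.digits 10 n).map Nat.digitChar).reverse := by
  unfold Nat.toDigits
  rw [pvToDigitsCore_eq (n+1) n [] h (by omega)]
  simp

lemma pvMapDigitChar_inj : ∀ (l1 l2 : List Nat), (∀ x ∈ l1, x < 10) → (∀ x ∈ l2, x < 10) →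
    l1.map Nat.digitChar = l2.map Nat.digitChar → l1 = l2 := by
  intro l1
  induction l1 with
  | nil => intro l2 _ _ h; cases l2 <;> simp_all
  | cons a t ih =>
    intro l2 h1 h2 h
    cases l2 with
    | nil => simp_all
    | cons b t2 =>
      simp only [List.map_cons, List.cons.injEq] at h
      have := pvDigitChar_inj a b (h1 a (by simp)) (h2 b (by simp)) h.1
      have := ih t2 (fun x hx => h1 x (by simp [hx])) (fun x hx => h2 x (by simp [hx])) h.2
      simp_all

lemma pvToDigits10_inj (m n : Nat) (h : Nat.toDigits 10 m = Nat.toDigits 10 n) : m = n := by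
  rcases Nat.eq_zero_or_pos m with hm | hm <;> rcases Nat.eq_zero_or_pos n with hn | hn
  · omega
  · exfalso
    subst hm
    rw [pvToDigits10_eq n hn] at h
    have h0 : Nat.toDigits 10 0 = ['0'] := rfl
    rw [h0] at h
    have hd : Nat.digits 10 n = [0] := by
      have := pvMapDigitChar_inj [0] (Nat.digits 10 n) (by simp)
        (fun x hx => Nat.digits_lt_base (by norm_num) hx) ?_
      · exact this.symm
      · have : ((Nat.digits 10 n).map Nat.digitChar).reverse = ['0'] := h.symm
        have := congrArg List.reverse this
        simpa [Nat.digitChar] using this.symm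
    have := Nat.getLast_digit_ne_zero 10 (Nat.pos_iff_ne_zero.mp hn)
    simp [hd] at this
  · exfalso
    subst hn
    rw [pvToDigits10_eq m hm] at h
    have h0 : Nat.toDigits 10 0 = ['0'] := rfl
    rw [h0] at h
    have hd : Nat.digits 10 m = [0] := by
      have := pvMapDigitChar_inj [0] (Nat.digits 10 m) (by simp)
        (fun x hx => Nat.digits_lt_base (by norm_num) hx) ?_
      · exact this.symm
      · have := congrArg List.reverse h
        simpa [Nat.digitChar] using this.symm
    have := Nat.getLast_digit_ne_zero 10 (Nat.pos_iff_ne_zero.mp hm)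
    simp [hd] at this
  · rw [pvToDigits10_eq m hm, pvToDigits10_eq n hn] at h
    have := congrArg List.reverse h
    simp only [List.reverse_reverse] at this
    have := pvMapDigitChar_inj _ _ (fun x hx => Nat.digits_lt_base (by norm_num) hx)
      (fun x hx => Nat.digits_lt_base (by norm_num) hx) this
    exact Nat.digits_inj_iff.mp this

lemma pvSong_inj (i j : Int) (hi : 0 ≤ i) (hj : 0 ≤ j) (h : pvSong i = pvSong j) : i = j := by
  unfold pvSong at h
  have h2 := congrArg String.toList h
  simp only [String.toList_append, List.append_cancel_left_eq, PySem.Int.toList_toStr] at h2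
  unfold PySem.Int.toChars at h2
  rw [if_neg (by omega), if_neg (by omega)] at h2
  have := pvToDigits10_inj _ _ h2
  omega
lemma pvAddSongs_spec (song : String) (villagers : List Int) :
    ∀ d : PySem.Dict Int (PySem.Set String), d.keys.Nodup →
    (pvAddSongs song villagers d).keys.Nodup ∧
    (∀ v : Int, v ∈ (pvAddSongs song villagers d).keys ↔ v ∈ d.keys ∨ v ∈ villagers) ∧
    (∀ (v : Int) (str : String),
      str ∈ (pvAddSongs song villagers d).getD v PySem.Set.empty ↔
        str ∈ d.getD v PySem.Set.empty ∨ (v ∈ villagers ∧ str = song)) := by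
  induction villagers with
  | nil => intro d hnd; simp [pvAddSongs, hnd]
  | cons w t ih =>
    intro d hnd
    have hstep : pvAddSongs song (w :: t) d =
        pvAddSongs song t (d.insert w (PySem.Set.add (d.getD w PySem.Set.empty) song)) := by
      simp [pvAddSongs]
    obtain ⟨n1, k1, m1⟩ := ih (d.insert w (PySem.Set.add (d.getD w PySem.Set.empty) song))
      (PySem.Dict.nodup_keys_insert _ _ _ hnd)
    refine ⟨by rw [hstep]; exact n1, ?_, ?_⟩
    · intro v
      rw [hstep, k1 v, PySem.Dict.mem_keys_insert]
      constructor
      · rintro ((rfl | hv) | hv) <;> simp_all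
      · rintro (hv | hv) <;> simp_all
        tauto
    · intro v str
      rw [hstep, m1 v str, PySem.Dict.getD_insert]
      by_cases hvw : v = w
      · subst hvw
        simp [PySem.Set.mem_add]
        tauto
      · simp [hvw]

lemma pvSetdefault_nodup (d : PySem.Dict Int (PySem.Set String)) (k : Int)
    (h : d.keys.Nodup) : (d.setdefault k PySem.Set.empty).keys.Nodup := by
  by_cases hc : d.contains k
  · rw [PySem.Dict.setdefault_of_contains _ _ hc]; exact h
  · rw [PySem.Dict.setdefault_of_not_contains _ _ (by simpa using hc)]
    exact PySem.Dict.nodup_keys_insert _ _ _ h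

lemma pvSetdefault_mem_keys (d : PySem.Dict Int (PySem.Set String)) (k v : Int) :
    v ∈ (d.setdefault k PySem.Set.empty).keys ↔ v ∈ d.keys ∨ v = k := by
  by_cases hc : d.contains k
  · rw [PySem.Dict.setdefault_of_contains _ _ hc]
    have := (PySem.Dict.contains_iff_mem_keys (d := d) (k := k)).mp hc
    constructor
    · tauto
    · rintro (h | rfl) <;> simp_all
  · rw [PySem.Dict.setdefault_of_not_contains _ _ (by simpa using hc)]
    rw [PySem.Dict.mem_keys_insert]
    tauto

lemma pvSetdefault_getD (d : PySem.Dict Int (PySem.Set String)) (k v : Int) :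
    (d.setdefault k PySem.Set.empty).getD v PySem.Set.empty = d.getD v PySem.Set.empty := by
  by_cases hvk : v = k
  · subst hvk; exact PySem.Dict.getD_setdefault_self d v PySem.Set.empty PySem.Set.empty
  · rw [PySem.Dict.getD_eq_get?_getD, PySem.Dict.get?_setdefault_of_ne _ _ hvk,
      ← PySem.Dict.getD_eq_get?_getD]

lemma pvExchange1_aux (t : List Int) :
    ∀ (d : PySem.Dict Int (PySem.Set String)) (E0 : PySem.Set String), d.keys.Nodup →
    (t.foldl (fun st v => (st.1.setdefault v PySem.Set.empty,
        PySem.Set.union st.2 (st.1.getD v PySem.Set.empty))) (d, E0)).1.keys.Nodup ∧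
    (∀ v : Int, v ∈ (t.foldl (fun st v => (st.1.setdefault v PySem.Set.empty,
        PySem.Set.union st.2 (st.1.getD v PySem.Set.empty))) (d, E0)).1.keys ↔ v ∈ d.keys ∨ v ∈ t) ∧
    (∀ v : Int, (t.foldl (fun st v => (st.1.setdefault v PySem.Set.empty,
        PySem.Set.union st.2 (st.1.getD v PySem.Set.empty))) (d, E0)).1.getD v PySem.Set.empty
        = d.getD v PySem.Set.empty) ∧
    (∀ str : String, str ∈ (t.foldl (fun st v => (st.1.setdefault v PySem.Set.empty,
        PySem.Set.union st.2 (st.1.getD v PySem.Set.empty))) (d, E0)).2 ↔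
        str ∈ E0 ∨ ∃ u ∈ t, str ∈ d.getD u PySem.Set.empty) := by
  induction t with
  | nil => intro d E0 hnd; simp [hnd]
  | cons w t ih =>
    intro d E0 hnd
    obtain ⟨n1, k1, g1, e1⟩ := ih (d.setdefault w PySem.Set.empty)
      (PySem.Set.union E0 (d.getD w PySem.Set.empty)) (pvSetdefault_nodup d w hnd)
    simp only [List.foldl_cons]
    refine ⟨n1, ?_, ?_, ?_⟩
    · intro v
      rw [k1 v, pvSetdefault_mem_keys]
      simp only [List.mem_cons]
      tauto
    · intro v
      rw [g1 v, pvSetdefault_getD]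
    · intro str
      rw [e1 str]
      simp only [PySem.Set.mem_union, List.mem_cons]
      constructor
      · rintro ((h | h) | ⟨u, hu, h⟩)
        · tauto
        · exact Or.inr ⟨w, Or.inl rfl, h⟩
        · rw [pvSetdefault_getD] at h
          exact Or.inr ⟨u, Or.inr hu, h⟩
      · rintro (h | ⟨u, (rfl | hu), h⟩)
        · tauto
        · tauto
        · exact Or.inr ⟨u, hu, by rw [pvSetdefault_getD]; exact h⟩

lemma pvExchange1_spec (villagers : List Int) (d : PySem.Dict Int (PySem.Set String))
    (hnd : d.keys.Nodup) :
    (pvExchange1 villagers d).1.keys.Nodup ∧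
    (∀ v : Int, v ∈ (pvExchange1 villagers d).1.keys ↔ v ∈ d.keys ∨ v ∈ villagers) ∧
    (∀ v : Int, (pvExchange1 villagers d).1.getD v PySem.Set.empty = d.getD v PySem.Set.empty) ∧
    (∀ str : String, str ∈ (pvExchange1 villagers d).2 ↔
        ∃ u ∈ villagers, str ∈ d.getD u PySem.Set.empty) := by
  obtain ⟨n1, k1, g1, e1⟩ := pvExchange1_aux villagers d PySem.Set.empty hnd
  exact ⟨n1, k1, g1, fun str => by rw [pvExchange1, e1 str]; simp [PySem.Set.empty]⟩

lemma pvExchange2_spec (ex : PySem.Set String) (villagers : List Int) :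
    ∀ d : PySem.Dict Int (PySem.Set String), d.keys.Nodup →
    (pvExchange2 ex villagers d).keys.Nodup ∧
    (∀ v : Int, v ∈ (pvExchange2 ex villagers d).keys ↔ v ∈ d.keys ∨ v ∈ villagers) ∧
    (∀ (v : Int) (str : String),
      str ∈ (pvExchange2 ex villagers d).getD v PySem.Set.empty ↔
        str ∈ d.getD v PySem.Set.empty ∨ (v ∈ villagers ∧ str ∈ ex)) := by
  induction villagers with
  | nil => intro d hnd; simp [pvExchange2, hnd]
  | cons w t ih =>
    intro d hnd
    have hstep : pvExchange2 ex (w :: t) d =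
        pvExchange2 ex t (d.insert w (PySem.Set.union (d.getD w PySem.Set.empty) ex)) := by
      simp [pvExchange2]
    obtain ⟨n1, k1, m1⟩ := ih (d.insert w (PySem.Set.union (d.getD w PySem.Set.empty) ex))
      (PySem.Dict.nodup_keys_insert _ _ _ hnd)
    refine ⟨by rw [hstep]; exact n1, ?_, ?_⟩
    · intro v
      rw [hstep, k1 v, PySem.Dict.mem_keys_insert]
      constructor
      · rintro ((rfl | hv) | hv) <;> simp_all
      · rintro (hv | hv) <;> simp_all
        tauto
    · intro v str
      rw [hstep, m1 v str, PySem.Dict.getD_insert]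
      by_cases hvw : v = w
      · subst hvw
        simp [PySem.Set.mem_union]
        tauto
      · simp [hvw]

lemma pvSpread_aux (present : PySem.Set Int) (L : List (Int × PySem.Set Int)) :
    ∀ kn0 : PySem.Dict Int (PySem.Set Int), (∀ q ∈ L, kn0.contains q.1 = true) →
    (L.map Prod.fst).Nodup →
    (L.foldl (fun kn q =>
      if PySem.Set.inter q.2 present ≠ [] then kn.insert q.1 (PySem.Set.union q.2 present) else kn) kn0).keys
      = kn0.keys ∧
    (∀ j, j ∉ L.map Prod.fst →
      (L.foldl (fun kn q =>
        if PySem.Set.inter q.2 present ≠ [] then kn.insert q.1 (PySem.Set.union q.2 present) else kn) kn0).get? j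
        = kn0.get? j) ∧
    (∀ j S, (j, S) ∈ L →
      (L.foldl (fun kn q =>
        if PySem.Set.inter q.2 present ≠ [] then kn.insert q.1 (PySem.Set.union q.2 present) else kn) kn0).get? j
        = if PySem.Set.inter S present ≠ [] then some (PySem.Set.union S present) else kn0.get? j) := by
  induction L with
  | nil => intro kn0 _ _; simp
  | cons q L ih =>
    intro kn0 hc hnd
    simp only [List.map_cons, List.nodup_cons] at hnd
    -- the dict after processing q
    set kn1 := if PySem.Set.inter q.2 present ≠ [] then kn0.insert q.1 (PySem.Set.union q.2 present) else kn0 with hkn1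
    have hc1 : ∀ r ∈ L, kn1.contains r.1 = true := by
      intro r hr
      rw [hkn1]
      split
      · rw [PySem.Dict.contains_insert]
        simp [hc r (by simp [hr])]
      · exact hc r (by simp [hr])
    have hkeys1 : kn1.keys = kn0.keys := by
      rw [hkn1]; split
      · exact PySem.Dict.keys_insert_of_contains _ _ (hc q (by simp))
      · rfl
    obtain ⟨hk, hnot, hyes⟩ := ih kn1 hc1 hnd.2
    have hfold : (q :: L).foldl (fun kn q =>
        if PySem.Set.inter q.2 present ≠ [] then kn.insert q.1 (PySem.Set.union q.2 present) else kn) kn0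
        = L.foldl (fun kn q =>
        if PySem.Set.inter q.2 present ≠ [] then kn.insert q.1 (PySem.Set.union q.2 present) else kn) kn1 := by
      simp only [List.foldl_cons, hkn1]
    refine ⟨by rw [hfold, hk, hkeys1], ?_, ?_⟩
    · intro j hj
      simp only [List.map_cons, List.mem_cons] at hj
      have hj1 : j ≠ q.1 := fun h => hj (Or.inl h)
      have hj2 : j ∉ L.map Prod.fst := fun h => hj (Or.inr h)
      rw [hfold, hnot j hj2, hkn1]
      split
      · exact PySem.Dict.get?_insert_of_ne _ _ hj1
      · rfl
    · intro j S hjS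
      rcases List.mem_cons.mp hjS with heq | hmem
      · subst heq
        rw [hfold, hnot j (by simpa using hnd.1), hkn1]
        simp only []
        split
        · exact PySem.Dict.get?_insert_self ..
        · rfl
      · rw [hfold, hyes j S hmem, hkn1]
        have hjq : j ≠ q.1 := fun hj => hnd.1 (hj ▸ List.mem_map_of_mem hmem)
        by_cases hSp : PySem.Set.inter S present ≠ []
        · rw [if_pos hSp, if_pos hSp]
        · rw [if_neg hSp, if_neg hSp]
          split
          · exact PySem.Dict.get?_insert_of_ne _ _ hjq
          · rfl

lemma pvSpread_spec (present : PySem.Set Int) (kn : PySem.Dict Int (PySem.Set Int))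
    (hnd : kn.keys.Nodup) :
    (pvSpread present kn).keys = kn.keys ∧
    (∀ j S, kn.get? j = some S →
      (pvSpread present kn).get? j =
        some (if PySem.Set.inter S present ≠ [] then PySem.Set.union S present else S)) := by
  have hnd' : (kn.items.map Prod.fst).Nodup := by
    simpa [PySem.Dict.keys] using hnd
  have hcont : ∀ q ∈ kn.items, kn.contains q.1 = true := by
    intro q hq
    rw [PySem.Dict.contains_iff_mem_keys]
    exact PySem.Dict.mem_keys_of_mem_items kn hq
  obtain ⟨hk, _, hyes⟩ := pvSpread_aux present kn.items kn hcont hnd'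
  refine ⟨hk, ?_⟩
  intro j S hjS
  have hmem : (j, S) ∈ kn.items := (PySem.Dict.get?_eq_some_iff_mem_items kn j S hnd).mp hjS
  rw [pvSpread, hyes j S hmem]
  split
  · rfl
  · rw [hjS]
-- membership in keys gives a looked-up value
lemma pvGetOfMemKeys {ν : Type} (d : PySem.Dict Int ν) (k : Int) (h : k ∈ d.keys) :
    ∃ v, d.get? k = some v := by
  cases hg : d.get? k with
  | none => exact absurd h ((PySem.Dict.get?_eq_none_iff_not_mem_keys d k).mp hg)
  | some v => exact ⟨v, rfl⟩

lemma pvNeNilIffExists {α : Type} (l : List α) : l ≠ [] ↔ ∃ x, x ∈ l := by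
  cases l <;> simp

-- one evening preserves the invariant
lemma pvStep_inv (dA : PySem.Dict Int (PySem.Set String)) (kn : PySem.Dict Int (PySem.Set Int))
    (seen : PySem.Set Int) (s : Int) (hs : 0 ≤ s) (villagers : List Int)
    (h : pvInv dA kn seen s) :
    pvInv (pvStepA dA (s, villagers)) (pvStepB (kn, seen) (s, villagers)).1
      (pvStepB (kn, seen) (s, villagers)).2 (s + 1) := by
  obtain ⟨ndA, ndK, ndS, hK, hI, hD, hB, hC⟩ := h
  have hIkey : ∀ i S, kn.get? i = some S → i ∈ kn.keys := by
    intro i S hg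
    by_contra hmem
    rw [(PySem.Dict.get?_eq_none_iff_not_mem_keys kn i).mpr hmem] at hg
    simp at hg
  by_cases hb : villagers.contains 1
  · -- bard evening
    simp only [pvStepA, pvStepB, hb, if_pos]
    have hb' : (1 : Int) ∈ villagers := by simpa using hb
    obtain ⟨n1, k1, m1⟩ := pvAddSongs_spec (pvSong s) villagers dA ndA
    have hsk : s ∉ kn.keys := fun hmem => absurd (hI s hmem).2 (by omega)
    have hskc : kn.contains s = false := by
      by_contra hc
      exact hsk ((PySem.Dict.contains_iff_mem_keys kn s).mp (by simpa using hc))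
    have hfresh : ∀ i ∈ kn.keys, pvSong i ≠ pvSong s := by
      intro i hmem heq
      obtain ⟨h0, hlt⟩ := hI i hmem
      exact absurd (pvSong_inj i s h0 hs heq) (by omega)
    refine ⟨n1, PySem.Dict.nodup_keys_insert _ _ _ ndK, PySem.Set.nodup_update _ _ ndS, ?_, ?_, ?_, ?_, ?_⟩
    · intro v
      rw [k1 v, PySem.Set.mem_update, ← hK v]
    · intro i hmem
      rcases (PySem.Dict.mem_keys_insert _ _ _ _).mp hmem with rfl | hmem
      · omega
      · have := hI i hmem; omega
    · intro i S hg
      rw [PySem.Dict.get?_insert] at hg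
      split at hg
      · cases hg
        rw [PySem.Set.mem_ofList]
        exact hb'
      · exact hD i S hg
    · intro i S hg v
      rw [PySem.Dict.get?_insert] at hg
      split at hg
      · next heq =>
        cases hg
        rw [PySem.Set.mem_ofList, heq, m1 v (pvSong s)]
        constructor
        · intro hv; exact Or.inr ⟨hv, rfl⟩
        · rintro (hin | ⟨hv, _⟩)
          · exfalso
            obtain ⟨i0, hi0, heq0⟩ := hC v (pvSong s) hin
            exact hfresh i0 hi0 heq0.symm
          · exact hv
      · next hne =>
        rw [hB i S hg v, m1 v (pvSong i)]
        constructor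
        · exact fun hin => Or.inl hin
        · rintro (hin | ⟨hv, heq⟩)
          · exact hin
          · exact absurd heq (hfresh i (hIkey i S hg))
    · intro v str hin
      rcases (m1 v str).mp hin with hin' | ⟨hv, rfl⟩
      · obtain ⟨i, hi, heq⟩ := hC v str hin'
        exact ⟨i, (PySem.Dict.mem_keys_insert _ _ _ _).mpr (Or.inr hi), heq⟩
      · exact ⟨s, (PySem.Dict.mem_keys_insert _ _ _ _).mpr (Or.inl rfl), rfl⟩
  · -- exchange evening
    simp only [pvStepA, pvStepB, hb, if_neg, Bool.false_eq_true, not_false_iff]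
    obtain ⟨n1, k1, g1, e1⟩ := pvExchange1_spec villagers dA ndA
    obtain ⟨n2, k2, m2⟩ := pvExchange2_spec (pvExchange1 villagers dA).2 villagers
      (pvExchange1 villagers dA).1 n1
    obtain ⟨hk, hget⟩ := pvSpread_spec (PySem.Set.ofList villagers) kn ndK
    have hget' : ∀ i S', (pvSpread (PySem.Set.ofList villagers) kn).get? i = some S' →
        ∃ S0, kn.get? i = some S0 ∧
          S' = if PySem.Set.inter S0 (PySem.Set.ofList villagers) ≠ []
               then PySem.Set.union S0 (PySem.Set.ofList villagers) else S0 := by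
      intro i S' hg
      have hmem : i ∈ kn.keys := by
        by_contra hmem
        rw [(PySem.Dict.get?_eq_none_iff_not_mem_keys _ i).mpr (by rwa [hk])] at hg
        simp at hg
      obtain ⟨S0, hS0⟩ := pvGetOfMemKeys kn i hmem
      refine ⟨S0, hS0, ?_⟩
      rw [hget i S0 hS0] at hg
      cases hg
      rfl
    have hinter : ∀ S0 : PySem.Set Int,
        (PySem.Set.inter S0 (PySem.Set.ofList villagers) ≠ []) ↔
        ∃ u ∈ villagers, u ∈ S0 := by
      intro S0
      rw [pvNeNilIffExists]
      constructor
      · rintro ⟨u, hu⟩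
        have := (PySem.Set.mem_inter _ _ u).mp hu
        exact ⟨u, (PySem.Set.mem_ofList _ u).mp this.2, this.1⟩
      · rintro ⟨u, hu1, hu2⟩
        exact ⟨u, (PySem.Set.mem_inter _ _ u).mpr ⟨hu2, (PySem.Set.mem_ofList _ u).mpr hu1⟩⟩
    refine ⟨n2, by rw [hk]; exact ndK, PySem.Set.nodup_update _ _ ndS, ?_, ?_, ?_, ?_, ?_⟩
    · intro v
      rw [k2 v, k1 v, PySem.Set.mem_update, ← hK v]
      tauto
    · intro i hmem
      rw [hk] at hmem
      have := hI i hmem; omega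
    · intro i S' hg
      obtain ⟨S0, hS0, rfl⟩ := hget' i S' hg
      split
      · rw [PySem.Set.mem_union]
        exact Or.inl (hD i S0 hS0)
      · exact hD i S0 hS0
    · intro i S' hg v
      obtain ⟨S0, hS0, rfl⟩ := hget' i S' hg
      have hgv : ∀ w : Int, pvSong i ∈ (pvExchange2 (pvExchange1 villagers dA).2 villagers
          (pvExchange1 villagers dA).1).getD w PySem.Set.empty ↔
          w ∈ S0 ∨ (w ∈ villagers ∧ ∃ u ∈ villagers, u ∈ S0) := by
        intro w
        rw [m2 w (pvSong i), g1 w, e1 (pvSong i), ← hB i S0 hS0 w]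
        constructor
        · rintro (hin | ⟨hw, u, hu1, hu2⟩)
          · exact Or.inl hin
          · exact Or.inr ⟨hw, u, hu1, (hB i S0 hS0 u).mpr hu2⟩
        · rintro (hin | ⟨hw, u, hu1, hu2⟩)
          · exact Or.inl hin
          · exact Or.inr ⟨hw, u, hu1, (hB i S0 hS0 u).mp hu2⟩
      rw [hgv v]
      split
      · next hc =>
        rw [PySem.Set.mem_union, PySem.Set.mem_ofList]
        have hex : ∃ u ∈ villagers, u ∈ S0 := (hinter S0).mp hc
        constructor
        · rintro (hin | hv)
          · exact Or.inl hin
          · exact Or.inr ⟨hv, hex⟩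
        · rintro (hin | ⟨hv, _⟩)
          · exact Or.inl hin
          · exact Or.inr hv
      · next hc =>
        have hnex : ¬ ∃ u ∈ villagers, u ∈ S0 := fun hex => hc ((hinter S0).mpr hex)
        constructor
        · exact fun hin => Or.inl hin
        · rintro (hin | ⟨_, hex⟩)
          · exact hin
          · exact absurd hex hnex
    · intro v str hin
      rcases (m2 v str).mp hin with hin' | ⟨hv, hinE⟩
      · rw [g1 v] at hin'
        obtain ⟨i, hi, heq⟩ := hC v str hin'
        exact ⟨i, by rwa [hk], heq⟩
      · obtain ⟨u, hu, hinu⟩ := (e1 str).mp hinE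
        obtain ⟨i, hi, heq⟩ := hC u str hinu
        exact ⟨i, by rwa [hk], heq⟩

-- the whole fold preserves the invariant
lemma pvFold_inv (evs : List (List Int)) : ∀ (s : Int), 0 ≤ s →
    ∀ dA kn seen, pvInv dA kn seen s →
    pvInv ((PySem.List.enumerate evs s).foldl pvStepA dA)
      ((PySem.List.enumerate evs s).foldl pvStepB (kn, seen)).1
      ((PySem.List.enumerate evs s).foldl pvStepB (kn, seen)).2
      (s + evs.length) := by
  induction evs with
  | nil => intro s hs dA kn seen h; simpa [PySem.List.enumerate] using h
  | cons w t ih =>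
    intro s hs dA kn seen h
    rw [PySem.List.enumerate_cons]
    simp only [List.foldl_cons, List.length_cons]
    have hstep := pvStep_inv dA kn seen s hs w h
    have := ih (s + 1) (by omega) (pvStepA dA (s, w)) (pvStepB (kn, seen) (s, w)).1
      (pvStepB (kn, seen) (s, w)).2 hstep
    have harith : s + 1 + (t.length : Int) = s + ((t.length : Int) + 1) := by ring
    rw [harith] at this
    push_cast
    convert this using 2

lemma pvInv_init : pvInv PySem.Dict.empty PySem.Dict.empty PySem.Set.empty 0 := by
  refine ⟨?_, ?_, ?_, ?_, ?_, ?_, ?_, ?_⟩ <;>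
    simp [PySem.Dict.keys_empty, PySem.Dict.get?_empty,
      PySem.Dict.getD_empty, PySem.Set.empty]

-- ===== VERDICT (by name: the statement is the Claim_ definition above) =====
theorem villagers_with_all_songs_spec : Claim_equal_villagers_with_all_songs := by
  intro evenings _
  unfold Spec_villagers_with_all_songs villagers_with_all_songs villagers_with_all_songs_alt
  obtain ⟨ndA, ndK, ndS, hK, hI, hD, hB, hC⟩ :=
    pvFold_inv evenings 0 le_rfl PySem.Dict.empty PySem.Dict.empty PySem.Set.empty pvInv_init
  set dA := (PySem.List.enumerate evenings 0).foldl pvStepA PySem.Dict.empty with hdA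
  set stB := (PySem.List.enumerate evenings 0).foldl pvStepB (PySem.Dict.empty, PySem.Set.empty)
    with hstB
  set kn := stB.1
  set seen := stB.2
  set d2 := dA.setdefault 1 PySem.Set.empty with hd2
  have nd2 : d2.keys.Nodup := pvSetdefault_nodup dA 1 ndA
  have hg2 : ∀ v : Int, d2.getD v PySem.Set.empty = dA.getD v PySem.Set.empty :=
    pvSetdefault_getD dA 1
  have hk2 : ∀ v : Int, v ∈ d2.keys ↔ v ∈ dA.keys ∨ v = 1 := pvSetdefault_mem_keys dA 1
  have hIkey : ∀ i S, kn.get? i = some S → i ∈ kn.keys := by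
    intro i S hg
    by_contra hmem
    rw [(PySem.Dict.get?_eq_none_iff_not_mem_keys kn i).mpr hmem] at hg
    simp at hg
  -- A's comprehension over items = a filter over the (nodup) keys
  have hitems : (d2.items.filter (fun q => PySem.Set.equal q.2 (d2.getD 1 PySem.Set.empty))).map (·.1)
      = d2.keys.filter (fun k => PySem.Set.equal (d2.getD k PySem.Set.empty) (d2.getD 1 PySem.Set.empty)) := by
    rw [PySem.Dict.items_eq_map_keys d2 nd2 PySem.Set.empty, List.filter_map, List.map_map]
    simp [Function.comp_def]
  -- the two qualification predicates agree
  have hpred : ∀ x : Int,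
      (PySem.Set.equal (d2.getD x PySem.Set.empty) (d2.getD 1 PySem.Set.empty) = true) ↔
      (kn.values.all (fun ks => PySem.Set.contains ks x) = true) := by
    intro x
    rw [PySem.Set.equal_iff, hg2, hg2]
    have hval : (kn.values.all (fun ks => PySem.Set.contains ks x) = true) ↔
        ∀ i S, kn.get? i = some S → x ∈ S := by
      rw [List.all_eq_true]
      constructor
      · intro hall i S hg
        have hmem : (i, S) ∈ kn.items := (PySem.Dict.get?_eq_some_iff_mem_items kn i S ndK).mp hg
        have : S ∈ kn.values := by
          simp only [PySem.Dict.values]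
          exact List.mem_map_of_mem hmem
        exact (PySem.Set.contains_iff S x).mp (hall S this)
      · intro hall ks hks
        simp only [PySem.Dict.values, List.mem_map] at hks
        obtain ⟨⟨i, S⟩, hmem, rfl⟩ := hks
        have hg := PySem.Dict.get?_of_mem_items kn hmem ndK
        exact (PySem.Set.contains_iff _ x).mpr (hall i _ hg)
    rw [hval]
    constructor
    · intro heq i S hg
      have h1S : (1 : Int) ∈ S := hD i S hg
      have hall : pvSong i ∈ dA.getD 1 PySem.Set.empty := (hB i S hg 1).mp h1S
      exact (hB i S hg x).mpr ((heq (pvSong i)).mpr hall)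
    · intro hx str
      constructor
      · intro hin
        obtain ⟨i, hi, rfl⟩ := hC x str hin
        obtain ⟨S, hS⟩ := pvGetOfMemKeys kn i hi
        exact (hB i S hS 1).mp (hD i S hS)
      · intro hin
        obtain ⟨i, hi, rfl⟩ := hC 1 str hin
        obtain ⟨S, hS⟩ := pvGetOfMemKeys kn i hi
        exact (hB i S hS x).mp (hx i S hS)
  -- the two pre-sort lists are permutations of each other
  have hperm : (d2.keys.filter (fun k => PySem.Set.equal (d2.getD k PySem.Set.empty) (d2.getD 1 PySem.Set.empty))).Perm
      ((PySem.Set.add seen 1).filter (fun v => kn.values.all (fun ks => PySem.Set.contains ks v))) := by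
    rw [List.perm_ext_iff_of_nodup (nd2.filter _) ((PySem.Set.nodup_add seen 1 ndS).filter _)]
    intro x
    rw [List.mem_filter, List.mem_filter]
    constructor
    · rintro ⟨hmem, hp⟩
      refine ⟨?_, (hpred x).mp hp⟩
      rw [PySem.Set.mem_add]
      rcases (hk2 x).mp hmem with hm | rfl
      · exact Or.inl ((hK x).mp hm)
      · exact Or.inr rfl
    · rintro ⟨hmem, hp⟩
      refine ⟨?_, (hpred x).mpr hp⟩
      rw [PySem.Set.mem_add] at hmem
      rcases hmem with hm | rfl
      · exact (hk2 x).mpr (Or.inl ((hK x).mpr hm))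
      · exact (hk2 1).mpr (Or.inr rfl)
  simp only []
  rw [hitems]
  exact PySem.List.sorted_eq_sorted_of_perm _ _ (fun x => x) (fun a b h => h) hperm
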